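-- pv_equiv track=rewrite | github.com/wvvgnermvnn/Tasks | 4task.py | semi_reversed_packing
-- ===== SOURCE A (Python) =====
-- from copy import deepcopy as dc
--
-- def semi_reversed_packing(number):
--
--     former = list(i + 1 for i in range(int(number)))
--     reversed_former = dc(former)
--     reversed_former.reverse()
--     new = list()
--
--     for i in range(len(former)):
--         new.append(former[i])
--         new.append(reversed_former[i])
--         new = new[:len(former)]
--     return new
-- ===== SOURCE B (Python) =====
-- def semi_reversed_packing(number):
--     n = int(number)
--     if n <= 0:
--         return []
--     out = []
--     for k in range(n // 2):
--         out += [k + 1, n - k]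
--     if n % 2 == 1:
--         out.append(n // 2 + 1)
--     return out
-- ===== Notes on version B (the rewrite author's own statement) =====
-- stated objective: faster
-- what changed: A materialises the full range, deep-copy-reverses it, and inside the loop appends and then re-truncates the growing list every iteration, which is quadratic; B emits each ascending/descending pair directly and appends the single middle element when the count is odd, in one linear pass with no copying.
import Mathlib
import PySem

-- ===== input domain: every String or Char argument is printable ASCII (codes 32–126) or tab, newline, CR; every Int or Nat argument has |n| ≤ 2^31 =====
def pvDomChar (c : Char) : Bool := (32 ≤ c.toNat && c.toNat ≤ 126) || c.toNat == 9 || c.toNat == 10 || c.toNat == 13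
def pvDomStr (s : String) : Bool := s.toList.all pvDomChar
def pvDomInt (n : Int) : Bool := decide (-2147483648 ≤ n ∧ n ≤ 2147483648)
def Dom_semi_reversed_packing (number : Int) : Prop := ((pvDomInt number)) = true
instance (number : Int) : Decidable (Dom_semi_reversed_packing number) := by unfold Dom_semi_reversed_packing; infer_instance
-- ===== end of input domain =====

-- B replaces A's quadratic append-then-retruncate loop by one direct linear pass emitting each
-- ascending/descending pair and the odd middle element; objective: faster (asymptotic).

-- ===== PORT A =====
-- former[i] and reversed_former[i] are indexed with i ∈ range(len(former)), always in range,
-- so pyGetD with default 0 is exact (Python never raises here).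
def semi_reversed_packing (number : Int) : List Int :=
  let former := (PySem.List.pyRange 0 number 1).map (fun i => i + 1)
  let reversed_former := former.reverse
  (PySem.List.pyRange 0 (former.length : Int) 1).foldl
    (fun new i =>
      ((new ++ [PySem.List.pyGetD former i 0]) ++ [PySem.List.pyGetD reversed_former i 0]).take
        former.length)
    []

-- ===== PORT B =====
def semi_reversed_packing_alt (number : Int) : List Int :=
  if number ≤ 0 then []
  else
    let out := (PySem.List.pyRange 0 (PySem.Int.floordiv number 2) 1).foldl
      (fun out k => out ++ [k + 1, number - k]) []
    if PySem.Int.mod number 2 = 1 then out ++ [PySem.Int.floordiv number 2 + 1] else out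

-- ===== PRECONDITION & SPEC =====
def Spec_semi_reversed_packing (number : Int) (out : List Int) : Prop := out = semi_reversed_packing_alt number
instance (number : Int) (out : List Int) : Decidable (Spec_semi_reversed_packing number out) := by unfold Spec_semi_reversed_packing; infer_instance

-- ===== CLAIM (what is proved, stated in full; the proofs are below) =====
def Claim_equal_semi_reversed_packing : Prop := ∀ (number : Int), Dom_semi_reversed_packing number → Spec_semi_reversed_packing number (semi_reversed_packing number)

-- ===== LEMMAS AND PROOFS =====

-- truncating before an append then truncating again is one truncation
lemma take_append_take (m : Nat) (xs ys : List Int) :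
    ((xs.take m) ++ ys).take m = (xs ++ ys).take m := by
  rw [List.take_append, List.take_append, List.take_take, List.length_take, Nat.min_self]
  have hmin : m - min m xs.length = m - xs.length := by omega
  rw [hmin]

-- A's loop keeps 'new' equal to the truncated flat interleaving
lemma foldA (m : Nat) (pair : Int → List Int) :
    ∀ (L : List Int) (acc : List Int),
      L.foldl (fun new i => (new ++ pair i).take m) (acc.take m)
        = (acc ++ L.flatMap pair).take m := by
  intro L
  induction L with
  | nil => intro acc; simp
  | cons a L ih =>
    intro acc
    have h1 : (acc.take m ++ pair a).take m = ((acc ++ pair a).take m) :=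
      take_append_take m acc (pair a)
    simp only [List.foldl_cons, h1, ih (acc ++ pair a), List.flatMap_cons, List.append_assoc]

-- the reversed 1..n list is the map i ↦ n - i over range(n)
lemma reverse_former (n : Int) :
    ((PySem.List.pyRange 0 n 1).map (fun i => i + 1)).reverse
      = (PySem.List.pyRange 0 n 1).map (fun i => n - i) := by
  rw [← List.map_reverse]
  have h : (PySem.List.pyRange 0 n 1).reverse = PySem.List.pyRange (n - 1) (-1) (-1) := by
    rw [PySem.List.pyRange_neg_one_eq_reverse]
    norm_num
  rw [h, PySem.List.pyRange_neg_one, PySem.List.pyRange_one, List.map_map, List.map_map]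
  have hl : (n - 1 - -1) = n - 0 := by ring
  rw [hl]
  apply List.map_congr_left
  intro k _
  simp only [Function.comp]
  ring

theorem semi_reversed_packing_spec : Claim_equal_semi_reversed_packing := by
  intro n _
  unfold Spec_semi_reversed_packing semi_reversed_packing semi_reversed_packing_alt
  by_cases hn : n ≤ 0
  · simp [PySem.List.pyRange_one_eq_nil hn, hn]
  · push_neg at hn
    simp only [if_neg (not_le.mpr hn)]
    set m : Nat := n.toNat with hm
    have hmn : (m : Int) = n := Int.toNat_of_nonneg (le_of_lt hn)
    -- left side: characterize as truncated flatMap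
    have hlen : ((PySem.List.pyRange 0 n 1).map (fun i => i + 1)).length = m := by
      simp [PySem.List.length_pyRange_one]
      omega
    rw [hlen, hmn]
    have hA := foldA m
      (fun i => [PySem.List.pyGetD ((PySem.List.pyRange 0 n 1).map (fun i => i + 1)) i 0,
                 PySem.List.pyGetD (((PySem.List.pyRange 0 n 1).map (fun i => i + 1)).reverse) i 0])
      (PySem.List.pyRange 0 n 1) []
    simp only [List.take_nil, List.nil_append] at hA
    have hstep : (fun (new : List Int) (i : Int) =>
        (((new ++ [PySem.List.pyGetD ((PySem.List.pyRange 0 n 1).map (fun i => i + 1)) i 0]) ++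
          [PySem.List.pyGetD (((PySem.List.pyRange 0 n 1).map (fun i => i + 1)).reverse) i 0]).take m))
        = (fun (new : List Int) (i : Int) =>
          (new ++ [PySem.List.pyGetD ((PySem.List.pyRange 0 n 1).map (fun i => i + 1)) i 0,
             PySem.List.pyGetD (((PySem.List.pyRange 0 n 1).map (fun i => i + 1)).reverse) i 0]).take m) := by
      funext new i
      rw [List.append_assoc]
      rfl
    rw [hstep, hA]
    -- evaluate the pair function on members of the range
    have hpair : (PySem.List.pyRange 0 n 1).flatMap
        (fun i => [PySem.List.pyGetD ((PySem.List.pyRange 0 n 1).map (fun i => i + 1)) i 0,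
                   PySem.List.pyGetD (((PySem.List.pyRange 0 n 1).map (fun i => i + 1)).reverse) i 0])
        = (PySem.List.pyRange 0 n 1).flatMap (fun i => [i + 1, n - i]) := by
      apply List.flatMap_congr
      intro i hi
      rw [PySem.List.mem_pyRange_one] at hi
      rw [reverse_former,
        PySem.List.pyGetD_map_pyRange_of_nonneg _ n i 0 hi.1 hi.2,
        PySem.List.pyGetD_map_pyRange_of_nonneg _ n i 0 hi.1 hi.2]
    rw [hpair]
    -- split the range at h := n // 2 and compute the take
    have hd : PySem.Int.floordiv n 2 = n / 2 := PySem.Int.floordiv_eq_ediv_of_pos (by omega)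
    have hmo : PySem.Int.mod n 2 = n % 2 := PySem.Int.mod_eq_emod_of_pos (by omega)
    set h : Int := n / 2 with hh
    have hsplit : PySem.List.pyRange 0 n 1
        = PySem.List.pyRange 0 h 1 ++ PySem.List.pyRange h n 1 :=
      PySem.List.pyRange_one_append 0 h n (by omega) (by omega)
    rw [hsplit, List.flatMap_append]
    have hlen1 : ((PySem.List.pyRange 0 h 1).flatMap (fun i => [i + 1, n - i])).length
        = 2 * h.toNat := by
      rw [List.length_flatMap]
      have : ∀ x ∈ PySem.List.pyRange 0 h 1, ([x + 1, n - x]).length = 2 := by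
        intro x _; rfl
      rw [List.map_congr_left this]
      simp [PySem.List.length_pyRange_one, Nat.mul_comm]
    have h2h : 2 * h.toNat ≤ m := by omega
    rw [List.take_append, hlen1, List.take_of_length_le (by rw [hlen1]; exact h2h)]
    rw [PySem.List.foldl_append_eq_flatMap, List.nil_append, hd, hmo]
    by_cases hodd : n % 2 = 1
    · have hmlen : m - 2 * h.toNat = 1 := by omega
      rw [if_pos hodd, hmlen]
      have hcons : PySem.List.pyRange h n 1 = h :: PySem.List.pyRange (h + 1) n 1 :=
        PySem.List.pyRange_one_cons (by omega)
      rw [hcons]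
      simp
    · have heven : n % 2 = 0 := by omega
      have hmlen : m - 2 * h.toNat = 0 := by omega
      rw [if_neg hodd, hmlen]
      simp
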